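-- pv_equiv track=rewrite | github.com/tuan-shark/DSA-PYTHON-2025 | BitStrings.py | FindBits
-- ===== SOURCE A (Python) =====
-- def FindBits(bits):
--     n = len(bits)
--     count = 0
--     for i in range(n):
--         for j in range(i+1,n):
--             if bits[i] == 0 and bits[j]==1:
--                 count +=1
--     return count
-- ===== SOURCE B (Python) =====
-- def FindBits(bits):
--     zeros = 0
--     count = 0
--     for b in bits:
--         if b == 1:
--             count += zeros
--         elif b == 0:
--             zeros += 1
--     return count
-- ===== Notes on version B (the rewrite author's own statement) =====
-- stated objective: faster
-- what changed: Replaced the nested index double loop counting zero-before-one pairs with a single pass that keeps a running count of zeros and adds it at each one.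
import Mathlib
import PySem

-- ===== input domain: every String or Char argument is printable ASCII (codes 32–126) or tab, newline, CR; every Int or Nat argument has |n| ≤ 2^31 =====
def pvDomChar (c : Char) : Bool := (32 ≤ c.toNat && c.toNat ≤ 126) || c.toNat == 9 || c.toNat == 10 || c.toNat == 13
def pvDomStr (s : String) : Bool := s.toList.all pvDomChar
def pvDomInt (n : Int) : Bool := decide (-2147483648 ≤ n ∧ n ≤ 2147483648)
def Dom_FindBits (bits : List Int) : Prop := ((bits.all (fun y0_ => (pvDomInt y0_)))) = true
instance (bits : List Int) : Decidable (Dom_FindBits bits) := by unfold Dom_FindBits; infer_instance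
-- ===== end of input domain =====

-- B replaces A's O(n^2) nested index loops over pairs by one O(n) pass that adds the
-- running number of zeros seen so far at each 1 (objective: faster, asymptotic).

-- ===== PORT A =====
def FindBits (bits : List Int) : Int :=
  let n : Int := bits.length
  (PySem.List.pyRange 0 n 1).foldl
    (fun count i =>
      (PySem.List.pyRange (i + 1) n 1).foldl
        (fun count j =>
          if PySem.List.pyGet? bits i = some 0 ∧ PySem.List.pyGet? bits j = some 1
          then count + 1 else count)
        count)
    0

-- ===== PORT B =====
def FindBits_alt (bits : List Int) : Int :=
  (bits.foldl
    (fun (st : Int × Int) b =>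
      if b = 1 then (st.1, st.2 + st.1)
      else if b = 0 then (st.1 + 1, st.2)
      else st)
    (0, 0)).2

-- ===== PRECONDITION & SPEC =====
def Spec_FindBits (bits : List Int) (out : Int) : Prop := out = FindBits_alt bits
instance (bits : List Int) (out : Int) : Decidable (Spec_FindBits bits out) := by unfold Spec_FindBits; infer_instance

-- ===== CLAIM (what is proved, stated in full; the proofs are below) =====
def Claim_equal_FindBits : Prop := ∀ (bits : List Int), Dom_FindBits bits → Spec_FindBits bits (FindBits bits)

-- ===== LEMMAS AND PROOFS =====

/-- number of ones in a list, as an Int -/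
def pvOnes (l : List Int) : Int := ((l.filter (· = 1)).length : Int)

/-- the pair count A computes (a zero strictly before a one), structurally -/
def pvPC : List Int → Int
  | [] => 0
  | x :: xs => (if x = 0 then pvOnes xs else 0) + pvPC xs

theorem pvOnes_cons (x : Int) (xs : List Int) :
    pvOnes (x :: xs) = (if x = 1 then 1 else 0) + pvOnes xs := by
  by_cases h : x = 1 <;> simp [pvOnes, List.filter, h] <;> omega

theorem pv_foldl_const (l : List Int) (c : Int) :
    l.foldl (fun (c : Int) (_ : Int) => c) c = c := by
  induction l generalizing c with
  | nil => rfl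
  | cons a l ih => simpa using ih c

/-- the inner loop of A (with the constant bits[i]=0 conjunct already discharged)
    counts the ones in the suffix xs of bits = pre ++ xs -/
theorem pv_fold_ones (xs : List Int) : ∀ (pre : List Int) (c : Int),
    (PySem.List.pyRange (pre.length : Int) ((pre.length : Int) + (xs.length : Int)) 1).foldl
      (fun c j => if PySem.List.pyGet? (pre ++ xs) j = some 1 then c + 1 else c) c
      = c + pvOnes xs := by
  induction xs with
  | nil =>
    intro pre c
    rw [PySem.List.pyRange_one_eq_nil (by simp)]
    simp [pvOnes]
  | cons x xs ih =>
    intro pre c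
    rw [PySem.List.pyRange_one_cons (by push_cast [List.length_cons]; omega)]
    rw [List.foldl_cons, PySem.List.pyGet?_append_length pre xs x]
    have e1 : ((pre.length : Int) + 1) = (((pre ++ [x]).length : Int)) := by
      push_cast; simp
    have e2 : ((pre.length : Int) + ((x :: xs).length : Int))
        = (((pre ++ [x]).length : Int)) + (xs.length : Int) := by
      push_cast; simp; ring
    have happ : pre ++ x :: xs = (pre ++ [x]) ++ xs := by simp
    rw [e1, e2, happ, pvOnes_cons]
    by_cases hx : x = 1
    · rw [if_pos (by rw [hx]), if_pos hx, ih (pre ++ [x]) (c + 1)]; ring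
    · rw [if_neg (by simpa using hx), if_neg hx, ih (pre ++ [x]) c]; ring

/-- outer loop of A computes the pair count of the remaining suffix -/
theorem pv_fold_outer (xs : List Int) : ∀ (pre : List Int) (c : Int),
    (PySem.List.pyRange (pre.length : Int) ((pre.length : Int) + (xs.length : Int)) 1).foldl
      (fun count i =>
        (PySem.List.pyRange (i + 1) ((pre.length : Int) + (xs.length : Int)) 1).foldl
          (fun c j =>
            if PySem.List.pyGet? (pre ++ xs) i = some 0 ∧ PySem.List.pyGet? (pre ++ xs) j = some 1
            then c + 1 else c) count) c = c + pvPC xs := by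
  induction xs with
  | nil =>
    intro pre c
    rw [PySem.List.pyRange_one_eq_nil (by simp)]
    simp [pvPC]
  | cons x xs ih =>
    intro pre c
    rw [PySem.List.pyRange_one_cons (by push_cast [List.length_cons]; omega)]
    rw [List.foldl_cons]
    have hget : PySem.List.pyGet? (pre ++ x :: xs) (pre.length : Int) = some x :=
      PySem.List.pyGet?_append_length pre xs x
    have e1 : ((pre.length : Int) + 1) = (((pre ++ [x]).length : Int)) := by
      push_cast; simp
    have e2 : ((pre.length : Int) + ((x :: xs).length : Int))
        = (((pre ++ [x]).length : Int)) + (xs.length : Int) := by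
      push_cast; simp; ring
    have happ : pre ++ x :: xs = (pre ++ [x]) ++ xs := by simp
    by_cases hx : x = 0
    · -- head is a 0: the inner fold counts the ones after it
      have hfun : (fun (c j : Int) =>
            if PySem.List.pyGet? (pre ++ x :: xs) (pre.length : Int) = some 0
               ∧ PySem.List.pyGet? (pre ++ x :: xs) j = some 1
            then c + 1 else c)
          = (fun (c j : Int) =>
            if PySem.List.pyGet? (pre ++ x :: xs) j = some 1 then c + 1 else c) := by
        funext c j
        rw [hget, hx]
        simp
      rw [hfun]
      have hones :
          (PySem.List.pyRange ((pre.length : Int) + 1)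
              ((pre.length : Int) + ((x :: xs).length : Int)) 1).foldl
            (fun (c j : Int) =>
              if PySem.List.pyGet? (pre ++ x :: xs) j = some 1 then c + 1 else c) c
          = c + pvOnes xs := by
        rw [e1, e2, happ]
        exact pv_fold_ones xs (pre ++ [x]) c
      rw [hones, e1, e2, happ, ih (pre ++ [x]) (c + pvOnes xs)]
      simp [pvPC, hx]; ring
    · -- head is not 0: the inner fold is the identity
      have hfun : (fun (c j : Int) =>
            if PySem.List.pyGet? (pre ++ x :: xs) (pre.length : Int) = some 0
               ∧ PySem.List.pyGet? (pre ++ x :: xs) j = some 1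
            then c + 1 else c)
          = (fun (c : Int) (_ : Int) => c) := by
        funext c j
        rw [hget]
        simp [hx]
      rw [hfun, pv_foldl_const]
      rw [e1, e2, happ, ih (pre ++ [x]) c]
      simp [pvPC, hx]

theorem pvA_eq_pc (bits : List Int) : FindBits bits = pvPC bits := by
  have h := pv_fold_outer bits [] 0
  simpa [FindBits] using h

/-- invariant for B's single pass -/
theorem pvB_inv (xs : List Int) : ∀ (z c : Int),
    (xs.foldl
      (fun (st : Int × Int) b =>
        if b = 1 then (st.1, st.2 + st.1)
        else if b = 0 then (st.1 + 1, st.2)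
        else st)
      (z, c)).2 = c + z * pvOnes xs + pvPC xs := by
  induction xs with
  | nil => intro z c; simp [pvOnes, pvPC]
  | cons x xs ih =>
    intro z c
    rw [List.foldl_cons]
    by_cases h1 : x = 1
    · rw [if_pos h1, ih, pvOnes_cons, if_pos h1]
      simp [pvPC, h1]; ring
    · by_cases h0 : x = 0
      · rw [if_neg h1, if_pos h0, ih, pvOnes_cons, if_neg h1]
        simp [pvPC, h0]; ring
      · rw [if_neg h1, if_neg h0, ih, pvOnes_cons, if_neg h1]
        simp [pvPC, h0]

theorem pvB_eq_pc (bits : List Int) : FindBits_alt bits = pvPC bits := by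
  have h := pvB_inv bits 0 0
  simpa [FindBits_alt] using h

-- ===== VERDICT (by name: the statement is the Claim_ definition above) =====
theorem FindBits_spec : Claim_equal_FindBits := by
  intro bits _
  unfold Spec_FindBits
  rw [pvA_eq_pc, pvB_eq_pc]
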